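-- pv_equiv track=rewrite | github.com/jackyzha0/dailycodingproblem | leetcode/removedupeinplace.py | soln
-- ===== SOURCE A (Python) =====
-- def soln(arr):
--     res = 0
--
--     if arr:
--         for i in range(len(arr) - 1):
--             if not arr[i] == arr[i + 1]:
--                 res += 1
--
--         return res + 1
--     return 0
-- ===== SOURCE B (Python) =====
-- def soln(arr):
--     n = len(arr)
--     runs = 0
--     i = 0
--     while i < n:
--         runs += 1
--         v = arr[i]
--         while i < n and arr[i] == v:
--             i += 1
--     return runs
-- ===== Notes on version B (the rewrite author's own statement) =====
-- stated objective: alternative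
-- what changed: Instead of counting adjacent transitions over indices and adding 1, B walks run by run: an outer loop counts each run and an inner loop skips its equal elements, so runs are counted directly with no transition counter, no +1, and no empty-list guard.
import Mathlib
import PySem

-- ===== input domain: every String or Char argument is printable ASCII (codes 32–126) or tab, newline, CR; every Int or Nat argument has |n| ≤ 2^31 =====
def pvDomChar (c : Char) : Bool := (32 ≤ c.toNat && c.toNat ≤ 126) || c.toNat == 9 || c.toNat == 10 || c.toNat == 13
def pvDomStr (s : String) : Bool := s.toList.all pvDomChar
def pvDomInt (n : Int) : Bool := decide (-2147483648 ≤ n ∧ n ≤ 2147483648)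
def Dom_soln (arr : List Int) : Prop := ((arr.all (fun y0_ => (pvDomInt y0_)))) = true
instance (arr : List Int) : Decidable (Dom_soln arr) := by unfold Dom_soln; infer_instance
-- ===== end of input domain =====

-- B counts runs directly with an outer run loop and an inner skip loop, instead of counting adjacent transitions by index and adding 1 (alternative decomposition, same cost).


-- ===== PORT A =====
-- for i in range(len(arr)-1): if not arr[i] == arr[i+1]: res += 1; return res + 1 (0 on empty)
def soln (arr : List Int) : Int :=
  if arr ≠ [] then
    ((PySem.List.pyRange 0 ((arr.length : Int) - 1) 1).foldl
      (fun res i =>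
        if ¬ (PySem.List.pyGetD arr i 0 = PySem.List.pyGetD arr (i + 1) 0) then res + 1 else res)
      0) + 1
  else 0

-- ===== PORT B =====
-- inner loop: skip the leading elements equal to v (the current run)
def solnSkipRun (v : Int) : List Int → List Int
  | [] => []
  | x :: xs => if x = v then solnSkipRun v xs else x :: xs

theorem solnSkipRun_length_le (v : Int) (xs : List Int) :
    (solnSkipRun v xs).length ≤ xs.length := by
  induction xs with
  | nil => simp [solnSkipRun]
  | cons x xs ih =>
    simp only [solnSkipRun]
    split
    · exact Nat.le_succ_of_le ih
    · simp

-- outer loop: one count per run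
def soln_alt : List Int → Int
  | [] => 0
  | x :: xs => 1 + soln_alt (solnSkipRun x xs)
termination_by l => l.length
decreasing_by
  exact Nat.lt_succ_of_le (solnSkipRun_length_le x xs)

-- ===== PRECONDITION & SPEC =====
def Spec_soln (arr : List Int) (out : Int) : Prop := out = soln_alt arr
instance (arr : List Int) (out : Int) : Decidable (Spec_soln arr out) := by unfold Spec_soln; infer_instance

-- ===== CLAIM (what is proved, stated in full; the proofs are below) =====
def Claim_equal_soln : Prop := ∀ (arr : List Int), Dom_soln arr → Spec_soln arr (soln arr)

-- ===== LEMMAS AND PROOFS =====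

-- the transition counter of A, expressed structurally
def solnTrans : List Int → Int
  | [] => 0
  | [_] => 0
  | a :: b :: t => (if a = b then 0 else 1) + solnTrans (b :: t)

-- the 0/1-count over Nat indices, pushed down to a structural recursion
theorem soln_countP_range (arr : List Int) :
    (((List.range (arr.length - 1)).countP
      (fun k => decide (¬ arr.getD k 0 = arr.getD (k + 1) 0))) : Int)
      = solnTrans arr := by
  induction arr with
  | nil => simp [solnTrans]
  | cons a xs ih =>
    cases xs with
    | nil => simp [solnTrans]
    | cons b t =>
      simp only [List.length_cons, Nat.add_sub_cancel] at ih ⊢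
      rw [List.range_succ_eq_map, List.countP_cons, List.countP_map]
      have hshift :
          (List.range t.length).countP
            ((fun k : Nat => decide (¬ (a :: b :: t).getD k 0 = (a :: b :: t).getD (k + 1) 0)) ∘ Nat.succ)
          = (List.range t.length).countP
            (fun k : Nat => decide (¬ (b :: t).getD k 0 = (b :: t).getD (k + 1) 0)) := by
        apply List.countP_congr
        intro k _
        simp [Function.comp, List.getD]
      rw [hshift]
      push_cast
      rw [ih]
      by_cases hab : a = b <;> simp [solnTrans, hab, List.getD] <;> ring

-- A's index fold computes exactly solnTrans
theorem soln_foldl_eq_trans (arr : List Int) :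
    ((PySem.List.pyRange 0 ((arr.length : Int) - 1) 1).foldl
      (fun res i =>
        if ¬ (PySem.List.pyGetD arr i 0 = PySem.List.pyGetD arr (i + 1) 0) then res + 1 else res)
      0) = solnTrans arr := by
  have hform :
      (fun (res : Int) (i : Int) =>
        if ¬ (PySem.List.pyGetD arr i 0 = PySem.List.pyGetD arr (i + 1) 0) then res + 1 else res)
      = (fun (res : Int) (i : Int) =>
        if (fun j => decide (¬ (PySem.List.pyGetD arr j 0 = PySem.List.pyGetD arr (j + 1) 0))) i = true
        then res + 1 else res) := by
    funext res i; simp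
  rw [hform, PySem.List.foldl_count_if, PySem.List.pyRange_one, List.countP_map]
  simp only [zero_add]
  rw [show ((arr.length : Int) - 1 - 0).toNat = arr.length - 1 by omega]
  have hpred :
      (List.range (arr.length - 1)).countP
        ((fun j => decide (¬ (PySem.List.pyGetD arr j 0 = PySem.List.pyGetD arr (j + 1) 0)))
          ∘ (fun k : Nat => ((k : Nat) : Int)))
      = (List.range (arr.length - 1)).countP
        (fun k => decide (¬ arr.getD k 0 = arr.getD (k + 1) 0)) := by
    apply List.countP_congr
    intro k _
    have h2 : (((k : Nat) : Int) + 1) = (((k + 1 : Nat)) : Int) := by push_cast; ring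
    simp only [Function.comp, h2, PySem.List.pyGetD_natCast]
  rw [hpred]
  exact soln_countP_range arr

-- B counts one more run than the transitions, on nonempty lists
theorem soln_alt_eq_trans (a : Int) (xs : List Int) :
    soln_alt (a :: xs) = solnTrans (a :: xs) + 1 := by
  induction xs generalizing a with
  | nil => simp [soln_alt, solnSkipRun, solnTrans]
  | cons b t ih =>
    by_cases hab : a = b
    · subst hab
      have : soln_alt (a :: a :: t) = soln_alt (a :: t) := by
        simp [soln_alt, solnSkipRun]
      rw [this, ih a]
      simp [solnTrans]
    · have : soln_alt (a :: b :: t) = 1 + soln_alt (b :: t) := by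
        simp [soln_alt, solnSkipRun, Ne.symm hab]
      rw [this, ih b]
      simp [solnTrans, hab]
      ring

-- ===== VERDICT (by name: the statement is the Claim_ definition above) =====
theorem soln_spec : Claim_equal_soln := by
  intro arr _
  unfold Spec_soln soln
  cases arr with
  | nil => simp [soln_alt]
  | cons a xs =>
    simp only [ne_eq, reduceCtorEq, not_false_eq_true, if_pos]
    rw [soln_foldl_eq_trans, soln_alt_eq_trans]
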